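-- pv_equiv track=rewrite | github.com/ise-uiuc/nnsmith | nnsmith/abstract/op.py | _pad_num_var_param
-- ===== SOURCE A (Python) =====
-- __MAX_RANK__ = 5
--
-- def _pad_num_var_param(rstart=1, max=None):
--     r = rstart  # rank
--     ret = []
--     while r <= __MAX_RANK__:
--         h = r * 2
--         if max is not None and h > max:
--             break
--         ret.append(h)
--         r += 1
--     return ret
-- ===== SOURCE B (Python) =====
-- __MAX_RANK__ = 5
--
-- def _pad_num_var_param(rstart=1, max=None):
--     upper = __MAX_RANK__ if max is None else min(__MAX_RANK__, max // 2)
--     return list(range(2 * rstart, 2 * upper + 1, 2))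
-- ===== Notes on version B (the rewrite author's own statement) =====
-- stated objective: simpler
-- what changed: Replaced the while-loop with appends and a break by a closed-form bound (min(MAX_RANK, max//2)) and a single range() producing the arithmetic sequence directly.
import Mathlib
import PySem

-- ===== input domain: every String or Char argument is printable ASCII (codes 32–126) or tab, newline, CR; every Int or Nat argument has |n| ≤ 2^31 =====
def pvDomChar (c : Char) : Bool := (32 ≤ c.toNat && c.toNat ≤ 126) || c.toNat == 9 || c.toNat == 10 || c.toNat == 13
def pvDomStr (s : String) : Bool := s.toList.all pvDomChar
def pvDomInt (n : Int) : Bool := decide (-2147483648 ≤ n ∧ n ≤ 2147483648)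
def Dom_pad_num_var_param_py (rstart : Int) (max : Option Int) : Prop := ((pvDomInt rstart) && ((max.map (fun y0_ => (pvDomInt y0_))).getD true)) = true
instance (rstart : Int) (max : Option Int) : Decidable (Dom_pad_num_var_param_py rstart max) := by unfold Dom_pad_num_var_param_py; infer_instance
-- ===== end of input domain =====

-- B replaces A's while-loop with appends and a break by a closed-form upper bound and one range(); objective: simpler.

-- ===== PORT A =====
-- while r <= __MAX_RANK__: h = r*2; if max is not None and h > max: break; ret.append(h); r += 1
def padLoopA (max : Option Int) (r : Int) (ret : List Int) : List Int :=
  if _h : r ≤ 5 then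
    if (match max with | some m => decide (r * 2 > m) | none => false) = true then ret
    else padLoopA max (r + 1) (ret ++ [r * 2])
  else ret
  termination_by (6 - r).toNat
  decreasing_by omega

def pad_num_var_param_py (rstart : Int) (max : Option Int) : List Int :=
  padLoopA max rstart []

-- ===== PORT B =====
def pad_num_var_param_py_alt (rstart : Int) (max : Option Int) : List Int :=
  let upper : Int := match max with | none => 5 | some m => min 5 (PySem.Int.floordiv m 2)
  PySem.List.pyRange (2 * rstart) (2 * upper + 1) 2

-- ===== PRECONDITION & SPEC =====
def Spec_pad_num_var_param_py (rstart : Int) (max : Option Int) (out : List Int) : Prop := out = pad_num_var_param_py_alt rstart max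
instance (rstart : Int) (max : Option Int) (out : List Int) : Decidable (Spec_pad_num_var_param_py rstart max out) := by unfold Spec_pad_num_var_param_py; infer_instance

-- ===== CLAIM (what is proved, stated in full; the proofs are below) =====
def Claim_equal_pad_num_var_param_py : Prop := ∀ (rstart : Int) (max : Option Int), Dom_pad_num_var_param_py rstart max → Spec_pad_num_var_param_py rstart max (pad_num_var_param_py rstart max)

-- ===== LEMMAS AND PROOFS =====

-- the effective upper rank bound: largest r with r ≤ 5 and (if max = some m) 2*r ≤ m
def upperOf (max : Option Int) : Int :=
  match max with | none => 5 | some m => min 5 (PySem.Int.floordiv m 2)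

theorem fd2 (m : Int) : PySem.Int.floordiv m 2 = m / 2 :=
  PySem.Int.floordiv_eq_ediv_of_pos (by norm_num)

theorem upperOf_le_five (max : Option Int) : upperOf max ≤ 5 := by
  cases max with
  | none => simp [upperOf]
  | some m => simp only [upperOf, fd2]; omega

theorem le_upperOf_some {m r : Int} : r ≤ 5 → r * 2 ≤ m → r ≤ upperOf (some m) := by
  intro h1 h2
  simp only [upperOf, fd2]
  omega

theorem upperOf_some_lt {m r : Int} : m < r * 2 → upperOf (some m) < r := by
  intro h
  simp only [upperOf, fd2]
  omega

theorem padLoopA_eq (max : Option Int) (r : Int) (ret : List Int) :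
    padLoopA max r ret =
      ret ++ (List.range (upperOf max - r + 1).toNat).map (fun k : Nat => 2 * (r + (k : Int))) := by
  rw [padLoopA.eq_def]
  by_cases h5 : r ≤ 5
  · simp only [dif_pos h5]
    cases max with
    | none =>
      simp only []
      rw [padLoopA_eq none (r + 1) (ret ++ [r * 2])]
      have hr : r ≤ upperOf none := by simp [upperOf]; omega
      have hn : (upperOf none - r + 1).toNat = (upperOf none - (r + 1) + 1).toNat + 1 := by omega
      rw [hn, List.range_succ_eq_map]
      simp [List.map_map, Function.comp]
      constructor
      · ring
      · intro a _; ring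
    | some m =>
      by_cases hb : r * 2 > m
      · simp only [decide_eq_true_eq, if_pos hb]
        have : (upperOf (some m) - r + 1).toNat = 0 := by
          have := upperOf_some_lt (r := r) (m := m) hb
          omega
        simp [this]
      · simp only [decide_eq_true_eq, if_neg hb]
        rw [padLoopA_eq (some m) (r + 1) (ret ++ [r * 2])]
        have hr : r ≤ upperOf (some m) := le_upperOf_some h5 (by omega)
        have hn : (upperOf (some m) - r + 1).toNat = (upperOf (some m) - (r + 1) + 1).toNat + 1 := by omega
        rw [hn, List.range_succ_eq_map]
        simp [List.map_map, Function.comp]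
        constructor
        · ring
        · intro a _; ring
  · simp only [dif_neg h5]
    have : (upperOf max - r + 1).toNat = 0 := by
      have := upperOf_le_five max
      omega
    simp [this]
  termination_by (6 - r).toNat
  decreasing_by all_goals omega

theorem alt_eq (rstart : Int) (max : Option Int) :
    pad_num_var_param_py_alt rstart max =
      (List.range (upperOf max - rstart + 1).toNat).map (fun k : Nat => 2 * (rstart + (k : Int))) := by
  have hU : upperOf max ≤ 5 := upperOf_le_five max
  show PySem.List.pyRange (2 * rstart) (2 * upperOf max + 1) 2 = _
  rw [PySem.List.pyRange_of_pos _ _ (by norm_num : (0:Int) < 2)]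
  by_cases h : rstart ≤ upperOf max
  · have hlt : 2 * rstart < 2 * upperOf max + 1 := by omega
    rw [if_pos hlt]
    have hc : ((2 * upperOf max + 1 - 2 * rstart + 2 - 1) / 2).toNat = (upperOf max - rstart + 1).toNat := by
      omega
    rw [hc]
    apply List.map_congr_left; intro k _; ring
  · have hlt : ¬ (2 * rstart < 2 * upperOf max + 1) := by omega
    rw [if_neg hlt]
    have : (upperOf max - rstart + 1).toNat = 0 := by omega
    simp [this]

-- ===== VERDICT (by name: the statement is the Claim_ definition above) =====
theorem pad_num_var_param_py_spec : Claim_equal_pad_num_var_param_py := by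
  intro rstart max _
  show pad_num_var_param_py rstart max = pad_num_var_param_py_alt rstart max
  rw [pad_num_var_param_py, padLoopA_eq, alt_eq]
  simp
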